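-- pv_equiv track=rewrite | github.com/Bibz-a/Dynasty-Archives | app/routes/admin.py | _sql_outside_single_quoted_strings
-- ===== SOURCE A (Python) =====
-- def _sql_outside_single_quoted_strings(sql: str) -> str:
--     """Concatenate regions outside standard single-quoted literals for keyword safety scans."""
--     parts: list[str] = []
--     i = 0
--     n = len(sql)
--     chunk_start = 0
--     while i < n:
--         if sql[i] == "'":
--             parts.append(sql[chunk_start:i])
--             i += 1
--             while i < n:
--                 if sql[i] == "'":
--                     if i + 1 < n and sql[i + 1] == "'":
--                         i += 2
--                         continue
--                     i += 1
--                     break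
--                 i += 1
--             chunk_start = i
--             continue
--         i += 1
--     parts.append(sql[chunk_start:])
--     return " ".join(parts)
-- ===== SOURCE B (Python) =====
-- def _sql_outside_single_quoted_strings(sql: str) -> str:
--     """Concatenate regions outside standard single-quoted literals for keyword safety scans."""
--     out: list[str] = []
--     in_string = False
--     i = 0
--     n = len(sql)
--     while i < n:
--         c = sql[i]
--         if in_string:
--             if c == "'":
--                 if i + 1 < n and sql[i + 1] == "'":
--                     i += 2
--                     continue
--                 in_string = False
--         else:
--             if c == "'":
--                 out.append(" ")
--                 in_string = True
--             else:
--                 out.append(c)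
--         i += 1
--     return "".join(out)
-- ===== Notes on version B (the rewrite author's own statement) =====
-- stated objective: simpler
-- what changed: Replaced A's nested while-loops with slice bookkeeping (chunk_start, parts list, ' '.join) by a single flat state machine over the characters with an in_string flag that copies characters outside literals and emits one space per opening quote.
import Mathlib
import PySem

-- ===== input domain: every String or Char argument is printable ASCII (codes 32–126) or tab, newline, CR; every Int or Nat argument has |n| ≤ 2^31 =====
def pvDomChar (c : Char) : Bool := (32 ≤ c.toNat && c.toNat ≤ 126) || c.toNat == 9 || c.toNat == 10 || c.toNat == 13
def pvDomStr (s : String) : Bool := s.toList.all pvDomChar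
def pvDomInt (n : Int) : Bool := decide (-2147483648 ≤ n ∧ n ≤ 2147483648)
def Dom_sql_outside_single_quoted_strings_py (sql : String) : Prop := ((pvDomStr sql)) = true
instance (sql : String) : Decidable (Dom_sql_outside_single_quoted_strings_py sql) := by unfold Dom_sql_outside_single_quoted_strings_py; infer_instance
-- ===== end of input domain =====

-- B replaces A's nested loops + slice bookkeeping + " ".join(parts) by one flat
-- in_string state machine emitting characters directly (objective: simpler).

-- ===== PORT A =====
-- inner while loop of A: consume a single-quoted literal ('' is an escape),
-- return the characters after the closing quote (everything consumed if unterminated)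
def pvInnerA (l : List Char) : List Char :=
  match l with
  | [] => []
  | c :: rest =>
    if c = '\'' then
      match rest with
      | '\'' :: rest2 => pvInnerA rest2
      | _ => rest
    else pvInnerA rest

-- equation lemmas for pvInnerA (the length bound below is cited by pvOuterA's decreasing_by)
theorem iA_nil : pvInnerA [] = [] := by simp [pvInnerA]
theorem iA_esc (t : List Char) : pvInnerA ('\''::'\''::t) = pvInnerA t := by simp [pvInnerA]
theorem iA_one : pvInnerA ['\''] = [] := by simp [pvInnerA]
theorem iA_close (d : Char) (t : List Char) (hd : d ≠ '\'') : pvInnerA ('\''::d::t) = d::t := by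
  rw [pvInnerA.eq_def]
  simp only [↓reduceIte]
  split
  · next rest2 he =>
      injection he with h1 _
      exact absurd h1 hd
  · rfl
theorem iA_skip (c : Char) (t : List Char) (hc : c ≠ '\'') : pvInnerA (c::t) = pvInnerA t := by
  rw [pvInnerA.eq_def]
  simp [hc]

theorem pvInnerA_length_le : ∀ (n : Nat) (l : List Char), l.length ≤ n → (pvInnerA l).length ≤ l.length := by
  intro n
  induction n with
  | zero => intro l h; rw [List.length_eq_zero_iff.mp (Nat.le_zero.mp h)]; simp [iA_nil]
  | succ n ih =>
    intro l h
    rcases l with _ | ⟨c, rest⟩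
    · simp [iA_nil]
    · by_cases hc : c = '\''
      · subst hc
        rcases rest with _ | ⟨d, t⟩
        · simp [iA_one]
        · by_cases hd : d = '\''
          · subst hd
            rw [iA_esc]
            have := ih t (by simp at h; omega)
            simp only [List.length_cons]
            omega
          · rw [iA_close d t hd]
            simp
      · rw [iA_skip c rest hc]
        have := ih rest (by simp at h; omega)
        simp only [List.length_cons]
        omega

-- outer while loop of A: collect the parts (chunks between literals), as char lists
def pvOuterA (l : List Char) (chunk : List Char) : List (List Char) :=
  match l with
  | [] => [chunk]
  | c :: rest =>
    if c = '\'' then chunk :: pvOuterA (pvInnerA rest) []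
    else pvOuterA rest (chunk ++ [c])
termination_by l.length
decreasing_by
  · exact Nat.lt_succ_of_le (pvInnerA_length_le rest.length rest le_rfl)
  · simp

def sql_outside_single_quoted_strings_py (sql : String) : String :=
  PySem.Str.join " " ((pvOuterA sql.toList []).map String.ofList)

-- ===== PORT B =====
-- Source B's single while loop: in_string flag, one output character per step outside a
-- string ('\'' becomes ' '); out is a list of single-character strings, so the final
-- "".join(out) is exactly String.ofList of the collected characters.
def pvLoopB : List Char → Bool → List Char
  | [], _ => []
  | '\'' :: '\'' :: rest2, true => pvLoopB rest2 true
  | '\'' :: rest, true => pvLoopB rest false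
  | _ :: rest, true => pvLoopB rest true
  | c :: rest, false => if c = '\'' then ' ' :: pvLoopB rest true else c :: pvLoopB rest false

def sql_outside_single_quoted_strings_py_alt (sql : String) : String :=
  String.ofList (pvLoopB sql.toList false)

-- ===== PRECONDITION & SPEC =====
def Spec_sql_outside_single_quoted_strings_py (sql : String) (out : String) : Prop := out = sql_outside_single_quoted_strings_py_alt sql
instance (sql : String) (out : String) : Decidable (Spec_sql_outside_single_quoted_strings_py sql out) := by unfold Spec_sql_outside_single_quoted_strings_py; infer_instance

-- ===== CLAIM (what is proved, stated in full; the proofs are below) =====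
def Claim_equal_sql_outside_single_quoted_strings_py : Prop := ∀ (sql : String), Dom_sql_outside_single_quoted_strings_py sql → Spec_sql_outside_single_quoted_strings_py sql (sql_outside_single_quoted_strings_py sql)

-- ===== LEMMAS AND PROOFS =====

-- equation lemmas for pvLoopB
theorem lB_nil (b : Bool) : pvLoopB [] b = [] := by simp [pvLoopB]
theorem lB_esc (t : List Char) : pvLoopB ('\''::'\''::t) true = pvLoopB t true := by simp [pvLoopB]
theorem lB_one : pvLoopB ['\''] true = [] := by simp [pvLoopB]
theorem lB_close (d : Char) (t : List Char) (hd : d ≠ '\'') : pvLoopB ('\''::d::t) true = pvLoopB (d::t) false := by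
  cases hdd : d
  simp_all [pvLoopB]
theorem lB_skip (c : Char) (t : List Char) (hc : c ≠ '\'') : pvLoopB (c::t) true = pvLoopB t true := by
  cases hcc : c
  simp_all [pvLoopB]
theorem lB_open (t : List Char) : pvLoopB ('\''::t) false = ' ' :: pvLoopB t true := by
  simp [pvLoopB]
theorem lB_copy (c : Char) (t : List Char) (hc : c ≠ '\'') : pvLoopB (c::t) false = c :: pvLoopB t false := by
  simp [pvLoopB, hc]

-- skipping a literal in B's inside-string state lands where A's inner loop lands
theorem pvLoopB_inside : ∀ (n : Nat) (l : List Char), l.length ≤ n →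
    pvLoopB l true = pvLoopB (pvInnerA l) false := by
  intro n
  induction n with
  | zero => intro l h; rw [List.length_eq_zero_iff.mp (Nat.le_zero.mp h)]; simp [iA_nil, lB_nil]
  | succ n ih =>
    intro l h
    rcases l with _ | ⟨c, rest⟩
    · simp [iA_nil, lB_nil]
    · by_cases hc : c = '\''
      · subst hc
        rcases rest with _ | ⟨d, t⟩
        · simp [iA_one, lB_one, lB_nil]
        · by_cases hd : d = '\''
          · subst hd
            rw [iA_esc, lB_esc]
            exact ih t (by simp at h; omega)
          · rw [iA_close d t hd, lB_close d t hd]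
      · rw [iA_skip c rest hc, lB_skip c rest hc]
        exact ih rest (by simp at h; omega)

theorem pvOuterA_cons : ∀ (n : Nat) (l : List Char), l.length ≤ n →
    ∀ chunk, ∃ q t, pvOuterA l chunk = q :: t := by
  intro n
  induction n with
  | zero =>
    intro l h chunk
    rw [List.length_eq_zero_iff.mp (Nat.le_zero.mp h)]
    exact ⟨chunk, [], by simp [pvOuterA]⟩
  | succ n ih =>
    intro l h chunk
    rcases l with _ | ⟨c, rest⟩
    · exact ⟨chunk, [], by simp [pvOuterA]⟩
    · by_cases hc : c = '\''
      · rw [pvOuterA]; simp [hc]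
      · rw [pvOuterA]; simp only [if_neg hc]
        exact ih rest (by simp at h; omega) _

theorem pvOuterA_join : ∀ (n : Nat) (l : List Char), l.length ≤ n → ∀ chunk,
    PySem.Chars.join [' '] (pvOuterA l chunk) = chunk ++ pvLoopB l false := by
  intro n
  induction n with
  | zero =>
    intro l h chunk
    rw [List.length_eq_zero_iff.mp (Nat.le_zero.mp h)]
    simp [pvOuterA, lB_nil, PySem.Chars.join_singleton]
  | succ n ih =>
    intro l h chunk
    rcases l with _ | ⟨c, rest⟩
    · simp [pvOuterA, lB_nil, PySem.Chars.join_singleton]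
    · by_cases hc : c = '\''
      · subst hc
        obtain ⟨q, t, hq⟩ := pvOuterA_cons (pvInnerA rest).length (pvInnerA rest) le_rfl []
        rw [pvOuterA, if_pos rfl, hq, PySem.Chars.join_cons_cons, ← hq]
        have hlen : (pvInnerA rest).length ≤ n := by
          have := pvInnerA_length_le rest.length rest le_rfl
          simp at h; omega
        rw [ih (pvInnerA rest) hlen []]
        rw [← pvLoopB_inside rest.length rest le_rfl, lB_open]
        simp
      · rw [pvOuterA]
        simp only [if_neg hc]
        rw [ih rest (by simp at h; omega) (chunk ++ [c]), lB_copy c rest hc]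
        simp

-- ===== VERDICT (by name: the statement is the Claim_ definition above) =====
theorem sql_outside_single_quoted_strings_py_spec : Claim_equal_sql_outside_single_quoted_strings_py := by
  intro sql _
  show _ = _
  unfold sql_outside_single_quoted_strings_py sql_outside_single_quoted_strings_py_alt
  have h := PySem.Str.toList_join " " ((pvOuterA sql.toList []).map String.ofList)
  have h2 : (List.map String.toList ((pvOuterA sql.toList []).map String.ofList)) = pvOuterA sql.toList [] := by
    simp [List.map_map, Function.comp_def]
  have h3 : (" " : String).toList = [' '] := rfl
  rw [h2, h3, pvOuterA_join sql.toList.length sql.toList le_rfl []] at h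
  simp only [List.nil_append] at h
  apply String.toList_injective
  rw [h, String.toList_ofList]
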